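-- pv_equiv track=rewrite | github.com/daviidlyon/syntax-analyzer | syntax.py | get_grammar_rule_occurrences
-- ===== SOURCE A (Python) =====
-- def get_grammar_rule_occurrences(grammar):
--     # Check for appearences in the grammar
--     def search_in_grammar(key):
--         matches = []
--         for rule, productions in grammar.items():
--             for production in productions:
--                 if key in production:
--                     matches.append((rule, production))
--         return matches
--
--     grammar_rule_occurrences = {}
--     # For every key fetch for appearences in all grammar
--     for rule_key in grammar:
--         grammar_rule_occurrences[rule_key] = search_in_grammar(rule_key)
--     return grammar_rule_occurrences
-- ===== SOURCE B (Python) =====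
-- def get_grammar_rule_occurrences(grammar):
--     # Instead of testing every rule key against every production (a full grammar
--     # re-scan per key), enumerate each production's substrings up to the longest
--     # key length and look them up in a hash set of the keys; each hit is appended
--     # to that key's occurrence list in one pass over the (rule, production) pairs.
--     keys = set(grammar)
--     maxlen = 0
--     for k in keys:
--         maxlen = max(maxlen, len(k))
--     occurrences = {rule: [] for rule in grammar}
--     for rule, productions in grammar.items():
--         for production in productions:
--             n = len(production)
--             found = set()
--             for i in range(n + 1):
--                 for m in range(min(maxlen, n - i) + 1):
--                     sub = production[i:i + m]
--                     if sub in keys: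
--                         found.add(sub)
--             for key in found:
--                 occurrences[key].append((rule, production))
--     return occurrences
-- ===== Notes on version B (the rewrite author's own statement) =====
-- stated objective: faster
-- what changed: Replaced A's per-key full grammar re-scan by substring enumeration: one pass over the (rule, production) pairs that enumerates each production's substrings up to the longest key length and looks them up in a hash set of keys, making the work independent of the number of keys.
import Mathlib
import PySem

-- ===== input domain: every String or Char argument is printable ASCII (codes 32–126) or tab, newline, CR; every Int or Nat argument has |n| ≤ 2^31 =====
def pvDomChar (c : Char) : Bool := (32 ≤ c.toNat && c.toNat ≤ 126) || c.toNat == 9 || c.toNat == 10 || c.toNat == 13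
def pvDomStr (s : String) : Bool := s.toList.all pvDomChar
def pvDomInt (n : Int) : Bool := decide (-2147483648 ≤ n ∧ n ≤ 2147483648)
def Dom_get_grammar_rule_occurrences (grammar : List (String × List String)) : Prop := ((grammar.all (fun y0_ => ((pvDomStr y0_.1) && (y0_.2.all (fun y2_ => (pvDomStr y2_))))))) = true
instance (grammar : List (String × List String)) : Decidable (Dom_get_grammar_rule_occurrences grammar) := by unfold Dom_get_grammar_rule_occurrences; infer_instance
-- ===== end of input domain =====

-- B replaces A's full grammar re-scan per rule key by substring enumeration: for each
-- production it enumerates the substrings up to the longest key length and looks them up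
-- in a hash set of the keys (return-value equivalence; neither program mutates its argument).

-- ===== PORT A =====
-- inner helper 'search_in_grammar' of A
def pvSearchA (grammar : List (String × List String)) (key : String) : List (String × String) :=
  grammar.foldl (fun acc rp =>
    rp.2.foldl (fun acc production =>
      if PySem.Str.isIn key production then acc ++ [(rp.1, production)] else acc) acc) []

def get_grammar_rule_occurrences (grammar : List (String × List String)) : List (String × List (String × String)) :=
  (grammar.foldl (fun d rp => d.insert rp.1 (pvSearchA grammar rp.1))
    (PySem.Dict.empty : PySem.Dict String (List (String × String)))).items

-- ===== PORT B =====
-- the inner 'found' loops of B: all substrings of p of length ≤ maxlen that are grammar keys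
def pvFound (keys : PySem.Set String) (maxlen : Int) (p : String) : PySem.Set String :=
  (PySem.List.pyRange 0 (PySem.Str.len p + 1) 1).foldl (fun found i =>
    (PySem.List.pyRange 0 (min maxlen (PySem.Str.len p - i) + 1) 1).foldl (fun found m =>
      let sub := PySem.Str.slice p (some i) (some (i + m))
      if PySem.Set.contains keys sub then PySem.Set.add found sub else found) found) PySem.Set.empty

-- B's 'maxlen' loop: the length of the longest key
def pvMaxlen (keys : PySem.Set String) : Int :=
  keys.foldl (fun acc k => max acc (PySem.Str.len k)) 0

def get_grammar_rule_occurrences_alt (grammar : List (String × List String)) : List (String × List (String × String)) :=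
  (grammar.foldl (fun occ rp =>
    rp.2.foldl (fun occ production =>
      (pvFound (PySem.Set.ofList (grammar.map Prod.fst))
          (pvMaxlen (PySem.Set.ofList (grammar.map Prod.fst))) production).foldl
        (fun occ key => occ.modify key [] (· ++ [(rp.1, production)])) occ) occ)
    (grammar.foldl (fun d rp => d.insert rp.1 []) PySem.Dict.empty)).items

-- ===== PRECONDITION & SPEC =====
-- Pre_ excludes assoc lists with duplicate rule keys: A's argument is a Python dict, which
-- cannot carry duplicate keys, so such lists are not faithful encodings of any input A sees.
def Pre_get_grammar_rule_occurrences (grammar : List (String × List String)) : Prop :=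
  (grammar.map Prod.fst).Nodup
instance (grammar : List (String × List String)) : Decidable (Pre_get_grammar_rule_occurrences grammar) := by
  unfold Pre_get_grammar_rule_occurrences; infer_instance

def pvWitness_get_grammar_rule_occurrences : (List (String × List String)) :=
  [("S", ["aSb", "T"]), ("T", ["t"])]

def Spec_get_grammar_rule_occurrences (grammar : List (String × List String)) (out : List (String × List (String × String))) : Prop := out = get_grammar_rule_occurrences_alt grammar
instance (grammar : List (String × List String)) (out : List (String × List (String × String))) : Decidable (Spec_get_grammar_rule_occurrences grammar out) := by unfold Spec_get_grammar_rule_occurrences; infer_instance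

-- ===== CLAIM (what is proved, stated in full; the proofs are below) =====
def Claim_equal_get_grammar_rule_occurrences : Prop := ∀ (grammar : List (String × List String)), Dom_get_grammar_rule_occurrences grammar → Pre_get_grammar_rule_occurrences grammar → Spec_get_grammar_rule_occurrences grammar (get_grammar_rule_occurrences grammar)

-- ===== LEMMAS AND PROOFS =====

-- the grammar flattened to its (rule, production) events, in traversal order
def pvEvents (grammar : List (String × List String)) : List (String × String) :=
  grammar.flatMap (fun rp => rp.2.map (fun p => (rp.1, p)))

theorem pvSearchA_eq (grammar : List (String × List String)) (key : String) :
    pvSearchA grammar key = (pvEvents grammar).filter (fun e => PySem.Str.isIn key e.2) := by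
  unfold pvSearchA pvEvents
  rw [show (fun (acc : List (String × String)) (rp : String × List String) =>
      rp.2.foldl (fun acc production =>
        if PySem.Str.isIn key production then acc ++ [(rp.1, production)] else acc) acc)
    = (fun acc rp => acc ++ ((rp.2.filter (fun p => PySem.Str.isIn key p)).map (fun p => (rp.1, p))))
    from funext fun m => funext fun rp => PySem.List.foldl_append_if _ _ _ _]
  rw [PySem.List.foldl_append_eq_flatMap]
  simp [List.filter_flatMap, List.filter_map, Function.comp_def]

theorem get_grammar_rule_occurrences_eq_map (grammar : List (String × List String))
    (hnd : (grammar.map Prod.fst).Nodup) :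
    get_grammar_rule_occurrences grammar
      = grammar.map (fun rp => (rp.1, (pvEvents grammar).filter (fun e => PySem.Str.isIn rp.1 e.2))) := by
  unfold get_grammar_rule_occurrences
  have := PySem.Dict.items_foldl_insert_fresh (l := grammar) (k := Prod.fst)
    (v := fun rp => pvSearchA grammar rp.1) (d := PySem.Dict.empty)
    (fun a _ => PySem.Dict.contains_empty _) hnd
  simp only [this]
  simp [pvSearchA_eq, PySem.Dict.empty]

-- ===== B side: the substring enumeration finds exactly the keys occurring in p =====

theorem pvMem_condAdd (L : List String) (keys : PySem.Set String) (s : PySem.Set String) (x : String) :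
    x ∈ L.foldl (fun s sub => if PySem.Set.contains keys sub then PySem.Set.add s sub else s) s
      ↔ x ∈ s ∨ (x ∈ L ∧ PySem.Set.contains keys x = true) := by
  induction L generalizing s with
  | nil => simp
  | cons a rest ih =>
    simp only [List.foldl_cons]
    by_cases h : PySem.Set.contains keys a = true
    · rw [if_pos h, ih]
      constructor
      · rintro (hs | h2)
        · rcases (PySem.Set.mem_add _ _ _).mp hs with hs | rfl
          · exact Or.inl hs
          · exact Or.inr ⟨by simp, h⟩
        · exact Or.inr ⟨by simp [h2.1], h2.2⟩
      · rintro (hs | ⟨hm, hk⟩)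
        · exact Or.inl ((PySem.Set.mem_add _ _ _).mpr (Or.inl hs))
        · rcases List.mem_cons.mp hm with rfl | hm
          · exact Or.inl ((PySem.Set.mem_add _ _ _).mpr (Or.inr rfl))
          · exact Or.inr ⟨hm, hk⟩
    · rw [if_neg h, ih]
      constructor
      · rintro (hs | h2)
        · exact Or.inl hs
        · exact Or.inr ⟨by simp [h2.1], h2.2⟩
      · rintro (hs | ⟨hm, hk⟩)
        · exact Or.inl hs
        · rcases List.mem_cons.mp hm with rfl | hm
          · exact absurd hk h
          · exact Or.inr ⟨hm, hk⟩

theorem pvNodup_condAdd (L : List String) (keys : PySem.Set String) (s : PySem.Set String)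
    (hs : s.Nodup) :
    (L.foldl (fun s sub => if PySem.Set.contains keys sub then PySem.Set.add s sub else s) s).Nodup := by
  induction L generalizing s with
  | nil => exact hs
  | cons a rest ih =>
    simp only [List.foldl_cons]
    split_ifs with h
    · exact ih _ (PySem.Set.nodup_add s a hs)
    · exact ih _ hs

-- all candidate substrings B enumerates for production p
def pvCands (maxlen : Int) (p : String) : List String :=
  (PySem.List.pyRange 0 (PySem.Str.len p + 1) 1).flatMap (fun i =>
    (PySem.List.pyRange 0 (min maxlen (PySem.Str.len p - i) + 1) 1).map (fun m =>
      PySem.Str.slice p (some i) (some (i + m))))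

theorem pvFound_eq (keys : PySem.Set String) (maxlen : Int) (p : String) :
    pvFound keys maxlen p
      = (pvCands maxlen p).foldl
          (fun s sub => if PySem.Set.contains keys sub then PySem.Set.add s sub else s)
          PySem.Set.empty := by
  unfold pvFound pvCands
  rw [List.foldl_flatMap]
  apply PySem.List.foldl_congr_mem
  intro acc i _
  rw [List.foldl_map]

theorem pvMem_pvCands_iff (maxlen : Int) (p x : String) (hlen : PySem.Str.len x ≤ maxlen) :
    x ∈ pvCands maxlen p ↔ PySem.Str.isIn x p = true := by
  unfold pvCands
  rw [PySem.Str.isIn_iff_infix]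
  constructor
  · intro hx
    rcases List.mem_flatMap.mp hx with ⟨i, hi, hx⟩
    rcases List.mem_map.mp hx with ⟨m, hm, rfl⟩
    rcases PySem.List.mem_pyRange_one.mp hi with ⟨h0i, _⟩
    rcases PySem.List.mem_pyRange_one.mp hm with ⟨h0m, _⟩
    have : (PySem.Str.slice p (some i) (some (i + m))).toList
        = (p.toList.drop i.toNat).take ((i + m).toNat - i.toNat) := by
      rw [PySem.Str.toList_slice, PySem.Chars.slice_eq_listSlice,
          PySem.List.slice_toNat _ h0i (by omega)]
    rw [this]
    exact ((List.take_prefix _ _).isInfix).trans (List.drop_suffix _ _).isInfix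
  · intro hinf
    rcases hinf with ⟨s, t, hst⟩
    have hn : p.toList.length = s.length + x.toList.length + t.length := by
      rw [← hst]; simp only [List.length_append]
    refine List.mem_flatMap.mpr ⟨(s.length : Int), ?_, ?_⟩
    · refine PySem.List.mem_pyRange_one.mpr ⟨by positivity, ?_⟩
      rw [PySem.Str.len_eq]; omega
    · refine List.mem_map.mpr ⟨(x.toList.length : Int), ?_, ?_⟩
      · refine PySem.List.mem_pyRange_one.mpr ⟨by positivity, ?_⟩
        have h1 : PySem.Str.len x = (x.toList.length : Int) := PySem.Str.len_eq x
        rw [PySem.Str.len_eq]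
        omega
      · apply String.toList_inj.mp
        have := PySem.List.slice_natCast_add (xs := p.toList) (j := s.length) (n := x.toList.length)
        rw [PySem.Str.toList_slice, PySem.Chars.slice_eq_listSlice, this, ← hst,
            List.append_assoc, List.drop_left, List.take_left]
      
-- a grammar key k is found in p iff it occurs in p as a substring
theorem pvMem_pvFound_iff (grammar : List (String × List String)) (p k : String)
    (hk : k ∈ grammar.map Prod.fst) :
    (k ∈ pvFound (PySem.Set.ofList (grammar.map Prod.fst))
        (pvMaxlen (PySem.Set.ofList (grammar.map Prod.fst))) p)
      ↔ PySem.Str.isIn k p = true := by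
  set keys := PySem.Set.ofList (grammar.map Prod.fst) with hkeys
  set maxlen := pvMaxlen keys with hml
  have hkmem : k ∈ keys := (PySem.Set.mem_ofList _ _).mpr hk
  have hkc : PySem.Set.contains keys k = true := (PySem.Set.contains_iff _ _).mpr hkmem
  have hlen : PySem.Str.len k ≤ maxlen := by
    rw [hml]; unfold pvMaxlen
    exact (PySem.List.le_foldl_max_int keys (fun k => PySem.Str.len k) 0).2 k hkmem
  rw [pvFound_eq, pvMem_condAdd]
  simp only [PySem.Set.empty, List.not_mem_nil, false_or]
  rw [pvMem_pvCands_iff maxlen p k hlen]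
  constructor
  · rintro ⟨h, _⟩; exact h
  · intro h; exact ⟨h, hkc⟩

theorem pvFound_nodup (keys : PySem.Set String) (maxlen : Int) (p : String) :
    (pvFound keys maxlen p).Nodup := by
  rw [pvFound_eq]; exact pvNodup_condAdd _ _ _ (by simp [PySem.Set.empty])

theorem pvFound_sub (keys : PySem.Set String) (maxlen : Int) (p : String) :
    ∀ x ∈ pvFound keys maxlen p, PySem.Set.contains keys x = true := by
  intro x hx
  rw [pvFound_eq, pvMem_condAdd] at hx
  rcases hx with h | ⟨_, h⟩
  · simp [PySem.Set.empty] at h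
  · exact h

-- ===== dict bookkeeping for B's append loop =====

theorem pvAppendLoop_getD (e : String × String) (kl : List String) (hnd : kl.Nodup)
    (d : PySem.Dict String (List (String × String))) (k : String) :
    (kl.foldl (fun occ key => occ.modify key [] (· ++ [e])) d).getD k []
      = if k ∈ kl then d.getD k [] ++ [e] else d.getD k [] := by
  induction kl generalizing d with
  | nil => simp
  | cons k0 rest ih =>
    have hk0 : k0 ∉ rest := (List.nodup_cons.mp hnd).1
    simp only [List.foldl_cons]
    rw [ih (List.nodup_cons.mp hnd).2, PySem.Dict.getD_modify]
    by_cases hkr : k ∈ rest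
    · have : k ≠ k0 := fun h => hk0 (h ▸ hkr)
      simp [hkr, this]
    · by_cases hkk0 : k = k0
      · subst hkk0; simp [hkr]
      · simp [hkr, hkk0]

theorem pvAppendLoop_keys (e : String × String) (kl : List String)
    (d : PySem.Dict String (List (String × String))) (hsub : ∀ key ∈ kl, d.contains key = true) :
    (kl.foldl (fun occ key => occ.modify key [] (· ++ [e])) d).keys = d.keys := by
  induction kl generalizing d with
  | nil => rfl
  | cons k0 rest ih =>
    simp only [List.foldl_cons]
    have hc : d.contains k0 = true := hsub k0 (by simp)
    have hkeys : (d.modify k0 [] (· ++ [e])).keys = d.keys := by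
      rw [PySem.Dict.keys_modify, PySem.Dict.keys_insert_of_contains _ _ hc]
    rw [ih _ (fun key hk => by
      rw [PySem.Dict.contains_modify]
      simp [hsub key (by simp [hk])]), hkeys]

-- one event step of B, as in the port
def pvEventStep (keys : PySem.Set String) (maxlen : Int)
    (occ : PySem.Dict String (List (String × String))) (e : String × String) :
    PySem.Dict String (List (String × String)) :=
  (pvFound keys maxlen e.2).foldl (fun occ key => occ.modify key [] (· ++ [e])) occ

theorem pvEventsFold_spec (keys : PySem.Set String) (maxlen : Int) (es : List (String × String))
    (d : PySem.Dict String (List (String × String)))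
    (hcov : ∀ x, PySem.Set.contains keys x = true → d.contains x = true) :
    (es.foldl (pvEventStep keys maxlen) d).keys = d.keys ∧
    ∀ k, (es.foldl (pvEventStep keys maxlen) d).getD k []
      = d.getD k [] ++ es.filter (fun e => decide (k ∈ pvFound keys maxlen e.2)) := by
  induction es generalizing d with
  | nil => simp
  | cons e rest ih =>
    have hsub : ∀ key ∈ pvFound keys maxlen e.2, d.contains key = true :=
      fun key hk => hcov key (pvFound_sub keys maxlen e.2 key hk)
    have hkeys1 : (pvEventStep keys maxlen d e).keys = d.keys :=
      pvAppendLoop_keys e _ d hsub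
    have hcov1 : ∀ x, PySem.Set.contains keys x = true →
        (pvEventStep keys maxlen d e).contains x = true := by
      intro x hx
      rw [PySem.Dict.contains_iff_mem_keys, hkeys1, ← PySem.Dict.contains_iff_mem_keys]
      exact hcov x hx
    obtain ⟨hkr, hgr⟩ := ih (pvEventStep keys maxlen d e) hcov1
    refine ⟨by simp only [List.foldl_cons]; rw [hkr, hkeys1], ?_⟩
    intro k
    simp only [List.foldl_cons, List.filter_cons]
    rw [hgr k]
    have := pvAppendLoop_getD e (pvFound keys maxlen e.2) (pvFound_nodup keys maxlen e.2) d k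
    rw [pvEventStep, this]
    by_cases hin : k ∈ pvFound keys maxlen e.2
    · simp [hin]
    · simp [hin]

theorem pvOcc0_items (grammar : List (String × List String))
    (hnd : (grammar.map Prod.fst).Nodup) :
    (grammar.foldl (fun d rp => d.insert rp.1 [])
      (PySem.Dict.empty : PySem.Dict String (List (String × String)))).items
      = grammar.map (fun rp => (rp.1, [])) := by
  have := PySem.Dict.items_foldl_insert_fresh (l := grammar) (k := Prod.fst)
    (v := fun _ => ([] : List (String × String))) (d := PySem.Dict.empty)
    (fun a _ => PySem.Dict.contains_empty _) hnd
  simpa using this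

-- B's nested fold over (grammar, productions) equals the flat fold over pvEvents
theorem pvNested_eq_events (keys : PySem.Set String) (maxlen : Int)
    (grammar : List (String × List String))
    (d : PySem.Dict String (List (String × String))) :
    grammar.foldl (fun occ rp =>
      rp.2.foldl (fun occ production =>
        (pvFound keys maxlen production).foldl
          (fun occ key => occ.modify key [] (· ++ [(rp.1, production)])) occ) occ) d
    = (pvEvents grammar).foldl (pvEventStep keys maxlen) d := by
  induction grammar generalizing d with
  | nil => rfl
  | cons rp rest ih =>
    simp only [pvEvents, List.flatMap_cons, List.foldl_append, List.foldl_cons]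
    rw [← pvEvents, ← ih]
    congr 1
    rw [List.foldl_map]
    rfl

theorem get_grammar_rule_occurrences_alt_eq_map (grammar : List (String × List String))
    (hnd : (grammar.map Prod.fst).Nodup) :
    get_grammar_rule_occurrences_alt grammar
      = grammar.map (fun rp => (rp.1, (pvEvents grammar).filter (fun e => PySem.Str.isIn rp.1 e.2))) := by
  unfold get_grammar_rule_occurrences_alt
  set keys := PySem.Set.ofList (grammar.map Prod.fst) with hkeys
  set maxlen := pvMaxlen keys with hml
  set occ0 : PySem.Dict String (List (String × String)) :=
    grammar.foldl (fun d rp => d.insert rp.1 []) PySem.Dict.empty with hocc0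
  have hitems0 : occ0.items = grammar.map (fun rp => (rp.1, [])) := pvOcc0_items grammar hnd
  have hkeys0 : occ0.keys = grammar.map Prod.fst := by
    simp only [PySem.Dict.keys, hitems0, List.map_map]; rfl
  have hnd0 : occ0.keys.Nodup := hkeys0 ▸ hnd
  have hcov : ∀ x, PySem.Set.contains keys x = true → occ0.contains x = true := by
    intro x hx
    rw [PySem.Dict.contains_iff_mem_keys, hkeys0]
    exact (PySem.Set.mem_ofList _ _).mp ((PySem.Set.contains_iff _ _).mp hx)
  rw [pvNested_eq_events]
  obtain ⟨hk, hg⟩ := pvEventsFold_spec keys maxlen (pvEvents grammar) occ0 hcov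
  set final := (pvEvents grammar).foldl (pvEventStep keys maxlen) occ0 with hfinal
  have hndf : final.keys.Nodup := hk ▸ hnd0
  rw [PySem.Dict.items_eq_map_keys final hndf []]
  rw [hk, hkeys0, List.map_map]
  apply List.map_congr_left
  intro rp hrp
  have hmemk : rp.1 ∈ grammar.map Prod.fst := List.mem_map_of_mem hrp
  have h0 : occ0.getD rp.1 [] = [] := by
    refine PySem.Dict.getD_of_mem_items occ0 ?_ hnd0 []
    rw [hitems0]
    exact List.mem_map_of_mem (f := fun rp => (rp.1, [])) hrp
  have hfilt : (pvEvents grammar).filter (fun e => decide (rp.1 ∈ pvFound keys maxlen e.2))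
      = (pvEvents grammar).filter (fun e => PySem.Str.isIn rp.1 e.2) := by
    apply List.filter_congr
    intro e _
    rw [Bool.eq_iff_iff, decide_eq_true_eq, hml, hkeys]
    exact pvMem_pvFound_iff grammar e.2 rp.1 hmemk
  simp only [Function.comp]
  rw [hg rp.1, h0, List.nil_append, hfilt]

-- ===== VERDICT (by name: the statement is the Claim_ definition above) =====
theorem get_grammar_rule_occurrences_spec : Claim_equal_get_grammar_rule_occurrences := by
  intro grammar _ hpre
  unfold Spec_get_grammar_rule_occurrences
  rw [get_grammar_rule_occurrences_eq_map grammar hpre,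
      get_grammar_rule_occurrences_alt_eq_map grammar hpre]
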